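-- pv_equiv track=rewrite | github.com/riteme/test | oi/Code/uoj/P2/std.py | compute
-- ===== SOURCE A (Python) =====
-- AND='AND'
--
-- OR='OR'
--
-- XOR='XOR'
--
-- def compute(x,op_list):
--     result=x;
--
--     for op_name,op_value in op_list:
--         if op_name==AND:
--             result&=op_value
--         elif op_name==OR:
--             result|=op_value
--         elif op_name==XOR:
--             result^=op_value
--
--     return result
-- ===== SOURCE B (Python) =====
-- AND='AND'
-- OR='OR'
-- XOR='XOR'
--
-- def compute(x, op_list):
--     # Collapse the whole op sequence into a per-bit truth table:
--     # `zeros` is the output for input bits that start 0, `ones` for bits that start 1.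
--     zeros = 0
--     ones = -1
--     for op_name, op_value in op_list:
--         if op_name == AND:
--             zeros &= op_value
--             ones &= op_value
--         elif op_name == OR:
--             zeros |= op_value
--             ones |= op_value
--         elif op_name == XOR:
--             zeros ^= op_value
--             ones ^= op_value
--     return (x & ones) | (~x & zeros)
-- ===== Notes on version B (the rewrite author's own statement) =====
-- stated objective: alternative
-- what changed: B collapses the op sequence into two bitmask accumulators (outputs for 0-bits and 1-bits), then combines them with x in one closed-form expression (x & ones) | (~x & zeros), instead of threading the running result through each op.
import Mathlib
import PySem

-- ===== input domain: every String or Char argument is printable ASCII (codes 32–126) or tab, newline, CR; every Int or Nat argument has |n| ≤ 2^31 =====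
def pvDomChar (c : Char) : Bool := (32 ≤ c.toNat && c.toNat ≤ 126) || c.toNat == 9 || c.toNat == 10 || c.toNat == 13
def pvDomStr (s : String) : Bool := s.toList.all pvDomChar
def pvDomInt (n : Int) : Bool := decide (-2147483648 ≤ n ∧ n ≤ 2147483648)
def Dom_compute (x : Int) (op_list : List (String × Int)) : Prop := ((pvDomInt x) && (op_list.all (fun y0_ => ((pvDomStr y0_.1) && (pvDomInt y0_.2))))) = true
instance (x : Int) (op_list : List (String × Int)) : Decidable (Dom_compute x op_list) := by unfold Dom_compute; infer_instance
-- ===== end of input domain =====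

-- B collapses the op sequence into two bitmask accumulators (the outputs for 0-bits and
-- 1-bits of the input) and combines them with x once at the end; A threads a single
-- running result through every op.

-- ===== PORT A =====
def compute (x : Int) (op_list : List (String × Int)) : Int :=
  op_list.foldl
    (fun result p =>
      if p.1 = "AND" then PySem.Int.band result p.2
      else if p.1 = "OR" then PySem.Int.bor result p.2
      else if p.1 = "XOR" then PySem.Int.bxor result p.2
      else result)
    x

-- ===== PORT B =====
def computeAltStep (acc : Int × Int) (p : String × Int) : Int × Int :=
  if p.1 = "AND" then (PySem.Int.band acc.1 p.2, PySem.Int.band acc.2 p.2)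
  else if p.1 = "OR" then (PySem.Int.bor acc.1 p.2, PySem.Int.bor acc.2 p.2)
  else if p.1 = "XOR" then (PySem.Int.bxor acc.1 p.2, PySem.Int.bxor acc.2 p.2)
  else acc

def compute_alt (x : Int) (op_list : List (String × Int)) : Int :=
  let zo := op_list.foldl computeAltStep (0, -1)
  PySem.Int.bor (PySem.Int.band x zo.2) (PySem.Int.band (Int.not x) zo.1)

-- ===== PRECONDITION & SPEC =====
def Spec_compute (x : Int) (op_list : List (String × Int)) (out : Int) : Prop := out = compute_alt x op_list
instance (x : Int) (op_list : List (String × Int)) (out : Int) : Decidable (Spec_compute x op_list out) := by unfold Spec_compute; infer_instance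

-- ===== CLAIM (what is proved, stated in full; the proofs are below) =====
def Claim_equal_compute : Prop := ∀ (x : Int) (op_list : List (String × Int)), Dom_compute x op_list → Spec_compute x op_list (compute x op_list)

-- ===== LEMMAS AND PROOFS =====

theorem sub_and_eq_ldiff (m : Nat) : ∀ n : Nat, m - (m &&& n) = Nat.ldiff m n := by
  induction m using Nat.binaryRec with
  | zero => intro n; simp [Nat.ldiff]
  | bit b m ih =>
    intro n
    conv_lhs => rw [← Nat.bit_testBit_zero_shiftRight_one n]
    conv_rhs => rw [← Nat.bit_testBit_zero_shiftRight_one n]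
    rw [Nat.land_bit, Nat.ldiff_bit, ← ih (n >>> 1)]
    have h := Nat.and_le_left (n := m) (m := n >>> 1)
    cases b <;> cases n.testBit 0 <;>
      simp [Nat.bit_val] <;> omega

theorem band_eq_land : ∀ a b : Int, PySem.Int.band a b = Int.land a b := by
  intro a b
  cases a with
  | ofNat m =>
    cases b with
    | ofNat n => simp [PySem.Int.band, Int.land]
    | negSucc n =>
      have h1 : ¬ (0 : Int) ≤ Int.negSucc n := by omega
      have h2 : (-(Int.negSucc n) - 1).toNat = n := by simp [Int.negSucc_eq]
      simp [PySem.Int.band, Int.land, h1, sub_and_eq_ldiff]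
  | negSucc m =>
    have h1 : ¬ (0 : Int) ≤ Int.negSucc m := by omega
    have h2 : (-(Int.negSucc m) - 1).toNat = m := by simp [Int.negSucc_eq]
    cases b with
    | ofNat n => simp [PySem.Int.band, Int.land, h1, sub_and_eq_ldiff]
    | negSucc n =>
      have h3 : ¬ (0 : Int) ≤ Int.negSucc n := by omega
      have h4 : (-(Int.negSucc n) - 1).toNat = n := by simp [Int.negSucc_eq]
      simp only [PySem.Int.band, Int.land, if_neg h1, if_neg h3, h2, h4]
      rw [Int.negSucc_eq]; ring

theorem bor_eq_lor : ∀ a b : Int, PySem.Int.bor a b = Int.lor a b := by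
  intro a b
  cases a with
  | ofNat m =>
    cases b with
    | ofNat n => simp [PySem.Int.bor, Int.lor]
    | negSucc n =>
      have h1 : ¬ (0 : Int) ≤ Int.negSucc n := by omega
      have h2 : (-(Int.negSucc n) - 1).toNat = n := by simp [Int.negSucc_eq]
      simp only [PySem.Int.bor, Int.lor, h2, if_neg h1]
      rw [sub_and_eq_ldiff, Int.negSucc_eq]
      simp
      ring
  | negSucc m =>
    have h1 : ¬ (0 : Int) ≤ Int.negSucc m := by omega
    have h2 : (-(Int.negSucc m) - 1).toNat = m := by simp [Int.negSucc_eq]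
    cases b with
    | ofNat n =>
      simp only [PySem.Int.bor, Int.lor, h2, if_neg h1]
      rw [sub_and_eq_ldiff, Int.negSucc_eq]
      simp
      ring
    | negSucc n =>
      have h3 : ¬ (0 : Int) ≤ Int.negSucc n := by omega
      have h4 : (-(Int.negSucc n) - 1).toNat = n := by simp [Int.negSucc_eq]
      simp only [PySem.Int.bor, Int.lor, h2, h4, if_neg h1, if_neg h3]
      rw [Int.negSucc_eq]; ring

theorem bxor_eq_xor : ∀ a b : Int, PySem.Int.bxor a b = Int.xor a b := by
  intro a b
  cases a with
  | ofNat m =>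
    cases b with
    | ofNat n => simp [PySem.Int.bxor, Int.xor]
    | negSucc n =>
      have h1 : ¬ (0 : Int) ≤ Int.negSucc n := by omega
      have h2 : (-(Int.negSucc n) - 1).toNat = n := by simp [Int.negSucc_eq]
      simp only [PySem.Int.bxor, Int.xor, h2, if_neg h1]
      rw [Int.negSucc_eq]; simp; ring
  | negSucc m =>
    have h1 : ¬ (0 : Int) ≤ Int.negSucc m := by omega
    have h2 : (-(Int.negSucc m) - 1).toNat = m := by simp [Int.negSucc_eq]
    cases b with
    | ofNat n =>
      simp only [PySem.Int.bxor, Int.xor, h2, if_neg h1]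
      rw [Int.negSucc_eq]; simp; ring
    | negSucc n =>
      have h3 : ¬ (0 : Int) ≤ Int.negSucc n := by omega
      have h4 : (-(Int.negSucc n) - 1).toNat = n := by simp [Int.negSucc_eq]
      simp [PySem.Int.bxor, Int.xor]

theorem not_eq_lnot (x : Int) : Int.not x = Int.lnot x := by
  cases x <;> rfl

theorem int_testBit_ext {a b : Int} (h : ∀ k, a.testBit k = b.testBit k) : a = b := by
  cases a with
  | ofNat m =>
    cases b with
    | ofNat n =>
      have : m = n := Nat.eq_of_testBit_eq (fun k => by simpa [Int.testBit] using h k)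
      simp [this]
    | negSucc n =>
      exfalso
      have hk := h (m + n + 1)
      have hm : m.testBit (m + n + 1) = false :=
        Nat.testBit_lt_two_pow (lt_of_le_of_lt (by omega) (Nat.lt_two_pow_self (n := m + n + 1)))
      have hn : n.testBit (m + n + 1) = false :=
        Nat.testBit_lt_two_pow (lt_of_le_of_lt (by omega) (Nat.lt_two_pow_self (n := m + n + 1)))
      simp [Int.testBit, hm, hn] at hk
  | negSucc m =>
    cases b with
    | ofNat n =>
      exfalso
      have hk := h (m + n + 1)
      have hm : m.testBit (m + n + 1) = false :=
        Nat.testBit_lt_two_pow (lt_of_le_of_lt (by omega) (Nat.lt_two_pow_self (n := m + n + 1)))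
      have hn : n.testBit (m + n + 1) = false :=
        Nat.testBit_lt_two_pow (lt_of_le_of_lt (by omega) (Nat.lt_two_pow_self (n := m + n + 1)))
      simp [Int.testBit, hm, hn] at hk
    | negSucc n =>
      have : m = n := Nat.eq_of_testBit_eq (fun k => by simpa [Int.testBit] using h k)
      simp [this]

theorem testBit_band (a b : Int) (k : Nat) :
    (PySem.Int.band a b).testBit k = (a.testBit k && b.testBit k) := by
  rw [band_eq_land, Int.testBit_land]

theorem testBit_bor (a b : Int) (k : Nat) :
    (PySem.Int.bor a b).testBit k = (a.testBit k || b.testBit k) := by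
  rw [bor_eq_lor, Int.testBit_lor]

theorem testBit_bxor (a b : Int) (k : Nat) :
    (PySem.Int.bxor a b).testBit k = xor (a.testBit k) (b.testBit k) := by
  rw [bxor_eq_xor, Int.testBit_lxor]

theorem testBit_not (a : Int) (k : Nat) : (Int.not a).testBit k = !(a.testBit k) := by
  rw [not_eq_lnot, Int.testBit_lnot]

/-- B's combine formula as a function of the two accumulators and the input. -/
def comb (z o x : Int) : Int := PySem.Int.bor (PySem.Int.band x o) (PySem.Int.band (Int.not x) z)

theorem testBit_comb (z o x : Int) (k : Nat) :
    (comb z o x).testBit k = ((x.testBit k && o.testBit k) || (!x.testBit k && z.testBit k)) := by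
  simp [comb, testBit_bor, testBit_band, testBit_not]

theorem comb_base (x : Int) : comb 0 (-1) x = x := by
  apply int_testBit_ext
  intro k
  rw [testBit_comb]
  have h1 : (-1 : Int).testBit k = true := by
    rw [show (-1 : Int) = Int.negSucc 0 from rfl]; simp [Int.testBit]
  have h0 : (0 : Int).testBit k = false := by
    rw [show (0 : Int) = Int.ofNat 0 from rfl]; simp [Int.testBit]
  rw [h0, h1]
  cases x.testBit k <;> simp

theorem comb_and (z o v x : Int) :
    comb (PySem.Int.band z v) (PySem.Int.band o v) x = PySem.Int.band (comb z o x) v := by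
  apply int_testBit_ext
  intro k
  rw [testBit_band, testBit_comb, testBit_comb, testBit_band, testBit_band]
  cases x.testBit k <;> cases z.testBit k <;> cases o.testBit k <;> cases v.testBit k <;> rfl

theorem comb_or (z o v x : Int) :
    comb (PySem.Int.bor z v) (PySem.Int.bor o v) x = PySem.Int.bor (comb z o x) v := by
  apply int_testBit_ext
  intro k
  rw [testBit_bor, testBit_comb, testBit_comb, testBit_bor, testBit_bor]
  cases x.testBit k <;> cases z.testBit k <;> cases o.testBit k <;> cases v.testBit k <;> rfl

theorem comb_xor (z o v x : Int) :
    comb (PySem.Int.bxor z v) (PySem.Int.bxor o v) x = PySem.Int.bxor (comb z o x) v := by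
  apply int_testBit_ext
  intro k
  rw [testBit_bxor, testBit_comb, testBit_comb, testBit_bxor, testBit_bxor]
  cases x.testBit k <;> cases z.testBit k <;> cases o.testBit k <;> cases v.testBit k <;> rfl

theorem comb_fold (ops : List (String × Int)) :
    ∀ (z o x : Int),
      comb (ops.foldl computeAltStep (z, o)).1 (ops.foldl computeAltStep (z, o)).2 x
        = compute (comb z o x) ops := by
  induction ops with
  | nil => intro z o x; simp [compute]
  | cons p rest ih =>
    intro z o x
    simp only [List.foldl_cons, compute, computeAltStep]
    by_cases h1 : p.1 = "AND"
    · simp only [h1, reduceIte]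
      rw [← comb_and]
      exact ih (PySem.Int.band z p.2) (PySem.Int.band o p.2) x
    · by_cases h2 : p.1 = "OR"
      · simp only [h2, reduceIte]
        rw [← comb_or]
        exact ih (PySem.Int.bor z p.2) (PySem.Int.bor o p.2) x
      · by_cases h3 : p.1 = "XOR"
        · simp only [h3, reduceIte]
          rw [← comb_xor]
          exact ih (PySem.Int.bxor z p.2) (PySem.Int.bxor o p.2) x
        · simp only [h1, h2, h3, reduceIte]
          exact ih z o x

-- ===== VERDICT (by name: the statement is the Claim_ definition above) =====
theorem compute_spec : Claim_equal_compute := by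
  intro x op_list _
  unfold Spec_compute compute_alt
  have h := comb_fold op_list 0 (-1) x
  rw [comb_base] at h
  simpa [comb] using h.symm
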